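-- pv_equiv track=rewrite | github.com/shkim9604/Algorithm | 프로그래머스/LV1/숫자 짝꿍/숫자 짝꿍.py | solution
-- ===== SOURCE A (Python) =====
-- def solution(X, Y):
--     answer = ''
--     numbers = {"9": 0, "8": 0, "7": 0, "6": 0, "5": 0, "4": 0, "3": 0, "2": 0, "1": 0, "0": 0}
--     x_count = list(set(X))
--     y_count = list(set(Y))
--     xy_count = []
--     for i in x_count:
--         if i in y_count:
--             xy_count.append(i)
--     if xy_count == ["0"]:
--         return "0"
--     for i in xy_count:
--         x = X.count(i)
--         y = Y.count(i)
--         numbers[i] += min(x, y)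
--     for i in numbers:
--         answer += i * (numbers[i])
--     if answer == "":
--         answer = "-1"
--     return answer
-- ===== SOURCE B (Python) =====
-- def solution(X, Y):
--     xs = sorted(X, reverse=True)
--     ys = sorted(Y, reverse=True)
--     out = []
--     i = j = 0
--     while i < len(xs) and j < len(ys):
--         a, b = xs[i], ys[j]
--         if a == b:
--             out.append(a)
--             i += 1
--             j += 1
--         elif a > b:
--             i += 1
--         else:
--             j += 1
--     if not out:
--         return "-1"
--     if out[0] == "0":
--         return "0"
--     return "".join(out)
-- ===== Notes on version B (the rewrite author's own statement) =====
-- stated objective: alternative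
-- what changed: Replaces A's dedup-sets, per-digit counting scans and counter-dict with a sort of both strings in descending order followed by a two-pointer merge that emits the common multiset already in order; the sentinels fall out of the merged string itself (empty -> '-1', head '0' -> '0').
import Mathlib
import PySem

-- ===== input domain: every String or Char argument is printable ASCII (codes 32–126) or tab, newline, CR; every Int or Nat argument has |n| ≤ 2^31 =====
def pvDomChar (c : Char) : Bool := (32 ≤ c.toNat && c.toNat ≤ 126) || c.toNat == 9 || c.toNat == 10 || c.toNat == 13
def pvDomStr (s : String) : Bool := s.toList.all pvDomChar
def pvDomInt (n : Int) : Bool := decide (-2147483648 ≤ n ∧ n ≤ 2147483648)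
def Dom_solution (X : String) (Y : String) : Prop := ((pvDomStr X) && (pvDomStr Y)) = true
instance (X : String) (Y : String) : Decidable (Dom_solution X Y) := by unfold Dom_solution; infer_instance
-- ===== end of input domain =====

-- B replaces the dedup-sets / per-digit counting scans / counter dict of A with sort-descending + two-pointer
-- merge (objective: alternative, not faster). A iterates list(set(X)) whose hash order is not modelled; the port
-- iterates the set in first-occurrence order — A's RESULT does not depend on that order (fixed-order digit dict).

-- ===== PORT A =====
-- the loops of A, kept as named folds (same state, same order)
def aNumbers0 : PySem.Dict Char Int :=
  PySem.Dict.ofList [('9', 0), ('8', 0), ('7', 0), ('6', 0), ('5', 0),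
                     ('4', 0), ('3', 0), ('2', 0), ('1', 0), ('0', 0)]

-- for i in x_count: if i in y_count: xy_count.append(i)
def aXYCount (X Y : String) : List Char :=
  let x_count : List Char := PySem.Set.ofList X.toList
  let y_count : List Char := PySem.Set.ofList Y.toList
  x_count.foldl (fun acc i => if (y_count.contains i) = true then acc ++ [i] else acc) []

-- for i in xy_count: numbers[i] += min(X.count(i), Y.count(i))  (KeyError outside Pre_)
def aNumbers (X Y : String) : PySem.Dict Char Int :=
  (aXYCount X Y).foldl (fun d i =>
    let x : Int := PySem.Str.count X (String.singleton i)
    let y : Int := PySem.Str.count Y (String.singleton i)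
    d.modify i 0 (fun v => v + min x y)) aNumbers0

-- for i in numbers: answer += i * numbers[i]
def aAnswer (X Y : String) : List Char :=
  (aNumbers X Y).keys.foldl (fun a i => a ++ List.replicate ((aNumbers X Y).getD i 0).toNat i) []

def solution (X : String) (Y : String) : String :=
  if aXYCount X Y = ['0'] then "0"
  else if aAnswer X Y = [] then "-1"
  else String.mk (aAnswer X Y)

-- ===== PORT B =====
-- the two-pointer while loop of Source B: advancing a pointer = dropping the head of that list
def mergeCommon : List Char → List Char → List Char
  | [], _ => []
  | _ :: _, [] => []
  | a :: xs, b :: ys =>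
    if a = b then a :: mergeCommon xs ys
    else if b < a then mergeCommon xs (b :: ys)
    else mergeCommon (a :: xs) ys

def solution_alt (X : String) (Y : String) : String :=
  let xs := PySem.List.sorted X.toList (fun c => c) true
  let ys := PySem.List.sorted Y.toList (fun c => c) true
  let out := mergeCommon xs ys
  match out with
  | [] => "-1"
  | c :: _ => if c = '0' then "0" else String.mk out

-- ===== PRECONDITION & SPEC =====
-- Pre_ excludes exactly the inputs where X and Y share a non-digit character: there A raises KeyError
-- (numbers[i] += … on a key outside "0".."9") and returns nothing.
def Pre_solution (X : String) (Y : String) : Prop :=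
  (X.toList.all (fun c => !(Y.toList.contains c)
      || (['0', '1', '2', '3', '4', '5', '6', '7', '8', '9'].contains c))) = true
instance (X : String) (Y : String) : Decidable (Pre_solution X Y) := by unfold Pre_solution; infer_instance
def pvWitness_solution : String × String := ("100a", "b2345" )

def Spec_solution (X : String) (Y : String) (out : String) : Prop := out = solution_alt X Y
instance (X : String) (Y : String) (out : String) : Decidable (Spec_solution X Y out) := by unfold Spec_solution; infer_instance

-- ===== CLAIM (what is proved, stated in full; the proofs are below) =====
def Claim_equal_solution : Prop := ∀ (X : String) (Y : String), Dom_solution X Y → Pre_solution X Y → Spec_solution X Y (solution X Y)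

-- ===== LEMMAS AND PROOFS =====

-- reading Pre_: a character common to X and Y is a decimal digit
theorem pre_mem {X Y : String} (h : Pre_solution X Y) :
    ∀ c ∈ X.toList, c ∈ Y.toList → c ∈ ['0', '1', '2', '3', '4', '5', '6', '7', '8', '9'] := by
  intro c hX hY
  have := List.all_eq_true.mp h c hX
  rcases Bool.or_eq_true_iff.mp this with h1 | h1
  · exact absurd (List.contains_iff_mem.mpr hY) (by simpa using h1)
  · exact List.contains_iff_mem.mp h1

-- s.count(c) for a single character is List.count (Chars.count.go consumes one char per step there)
theorem countGo_singleton (c : Char) : ∀ (fuel : Nat) (l : List Char) (acc : Nat),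
    l.length ≤ fuel → PySem.Chars.count.go [c] fuel l acc = acc + l.count c := by
  intro fuel
  induction fuel with
  | zero => intro l acc h; rw [PySem.Chars.count.go.eq_def]; cases l <;> simp_all
  | succ n ih =>
    intro l acc h
    rw [PySem.Chars.count.go.eq_def]
    cases l with
    | nil => simp
    | cons a t =>
      simp only [List.isPrefixOf, List.length_cons] at *
      by_cases hc : c = a
      · subst hc
        simp only [BEq.rfl, Bool.true_and, if_pos]
        have hd : List.drop (([] : List Char).length + 1) (c :: t) = t := by simp
        rw [hd, ih t (acc + 1) (by omega)]
        simp
        omega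
      · have : (c == a) = false := by simp [hc]
        simp only [this, Bool.false_and, if_neg, Bool.false_eq_true, not_false_iff]
        rw [ih t acc (by omega)]
        simp only [List.count_cons]
        have : (a == c) = false := by simp; exact fun h => hc h.symm
        simp [this]

theorem str_count_singleton (s : String) (c : Char) :
    PySem.Str.count s (String.singleton c) = s.toList.count c := by
  simp only [PySem.Str.count_eq, String.toList_singleton]
  unfold PySem.Chars.count
  simpa using countGo_singleton c s.toList.length s.toList 0 (le_refl _)

-- Set.update by elements already present does nothing
theorem set_update_of_subset {s : PySem.Set Char} : ∀ (l : List Char), (∀ x ∈ l, x ∈ s) → PySem.Set.update s l = s := by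
  intro l
  induction l generalizing s with
  | nil => intro _; rfl
  | cons a t ih =>
    intro h
    have : PySem.Set.update s (a :: t) = PySem.Set.update (s.add a) t := rfl
    rw [this, PySem.Set.add_of_mem (h a (by simp))]
    exact ih (fun x hx => h x (by simp [hx]))

-- the counting loop: getD after folding modify over a nodup list
theorem getD_fold_modify (w : Char → Int) : ∀ (l : List Char) (d : PySem.Dict Char Int) (k : Char),
    l.Nodup →
    (l.foldl (fun d i => d.modify i 0 (fun v => v + w i)) d).getD k 0
      = d.getD k 0 + (if k ∈ l then w k else 0) := by
  intro l
  induction l with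
  | nil => intro d k _; simp
  | cons a t ih =>
    intro d k hnd
    simp only [List.foldl_cons]
    rw [ih _ k hnd.of_cons]
    rw [PySem.Dict.getD_modify]
    by_cases hk : k = a
    · subst hk
      have : k ∉ t := (List.nodup_cons.mp hnd).1
      simp [this]
    · simp [hk, List.mem_cons]

-- ===== merge lemmas =====

theorem mem_mergeCommon : ∀ (xs ys : List Char) (c : Char), c ∈ mergeCommon xs ys → c ∈ xs := by
  intro xs
  induction xs with
  | nil => intro ys c h; simp [mergeCommon] at h
  | cons a xs ihx =>
    intro ys
    induction ys with
    | nil => intro c h; simp [mergeCommon] at h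
    | cons b ys ihy =>
      intro c h
      simp only [mergeCommon] at h
      split_ifs at h with h1 h2
      · rcases List.mem_cons.mp h with h | h
        · simp [h]
        · exact List.mem_cons_of_mem _ (ihx _ _ h)
      · exact List.mem_cons_of_mem _ (ihx _ _ h)
      · exact ihy _ h

theorem count_mergeCommon : ∀ (xs ys : List Char),
    xs.Pairwise (fun a b => b ≤ a) → ys.Pairwise (fun a b => b ≤ a) →
    ∀ c, (mergeCommon xs ys).count c = min (xs.count c) (ys.count c) := by
  intro xs
  induction xs with
  | nil => intro ys _ _ c; simp [mergeCommon]
  | cons a xs ihx =>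
    intro ys
    induction ys with
    | nil => intro _ _ c; simp [mergeCommon]
    | cons b ys ihy =>
      intro hx hy c
      simp only [mergeCommon]
      split_ifs with h1 h2
      · subst h1
        by_cases hc : c = a
        · subst hc
          rw [List.count_cons_self, List.count_cons_self, List.count_cons_self,
              ihx ys hx.of_cons hy.of_cons c]
          omega
        · rw [List.count_cons_of_ne (Ne.symm hc), List.count_cons_of_ne (Ne.symm hc), List.count_cons_of_ne (Ne.symm hc),
              ihx ys hx.of_cons hy.of_cons c]
      · -- b < a : a cannot occur in b :: ys
        rw [ihx (b :: ys) hx.of_cons hy c]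
        by_cases hc : c = a
        · subst hc
          have hz : (b :: ys).count c = 0 := by
            rw [List.count_eq_zero]
            intro hm
            rcases List.mem_cons.mp hm with h | h
            · exact h1 h
            · exact absurd (lt_of_le_of_lt (List.rel_of_pairwise_cons hy h) h2) (lt_irrefl _)
          rw [hz, List.count_cons_self]
          omega
        · rw [List.count_cons_of_ne (Ne.symm hc)]
      · -- a < b : b cannot occur in a :: xs
        rw [ihy hx hy.of_cons c]
        by_cases hc : c = b
        · subst hc
          have hb : a < c := lt_of_le_of_ne (le_of_not_gt h2) h1
          have hz : (a :: xs).count c = 0 := by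
            rw [List.count_eq_zero]
            intro hm
            rcases List.mem_cons.mp hm with h | h
            · exact absurd hb (h ▸ lt_irrefl _)
            · exact absurd (lt_of_le_of_lt (List.rel_of_pairwise_cons hx h) hb) (lt_irrefl _)
          rw [hz, List.count_cons_self]
          omega
        · rw [List.count_cons_of_ne (Ne.symm hc)]

theorem pairwise_mergeCommon : ∀ (xs ys : List Char),
    xs.Pairwise (fun a b => b ≤ a) → ys.Pairwise (fun a b => b ≤ a) →
    (mergeCommon xs ys).Pairwise (fun a b => b ≤ a) := by
  intro xs
  induction xs with
  | nil => intro ys _ _; simp [mergeCommon]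
  | cons a xs ihx =>
    intro ys
    induction ys with
    | nil => intro _ _; simp [mergeCommon]
    | cons b ys ihy =>
      intro hx hy
      simp only [mergeCommon]
      split_ifs with h1 h2
      · refine List.pairwise_cons.mpr ⟨?_, ihx ys hx.of_cons hy.of_cons⟩
        intro x hxm
        exact List.rel_of_pairwise_cons hx (mem_mergeCommon _ _ _ hxm)
      · exact ihx (b :: ys) hx.of_cons hy
      · exact ihy hx hy.of_cons

-- ===== the canonical common list =====

def digitsDesc : List Char := ['9', '8', '7', '6', '5', '4', '3', '2', '1', '0']

def mShared (X Y : String) (c : Char) : Nat := min (X.toList.count c) (Y.toList.count c)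

def canon (X Y : String) : List Char := digitsDesc.flatMap (fun d => List.replicate (mShared X Y d) d)

theorem count_flatMap_replicate (m : Char → Nat) : ∀ (ds : List Char), ds.Nodup → ∀ c,
    (ds.flatMap (fun d => List.replicate (m d) d)).count c = if c ∈ ds then m c else 0 := by
  intro ds
  induction ds with
  | nil => intro _ c; simp
  | cons d ds ih =>
    intro hnd c
    rw [List.flatMap_cons, List.count_append, List.count_replicate, ih hnd.of_cons c]
    by_cases hc : c = d
    · subst hc
      have hnm : c ∉ ds := (List.nodup_cons.mp hnd).1
      simp [hnm]
    · have hd : (d == c) = false := beq_eq_false_iff_ne.mpr (Ne.symm hc)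
      simp [hd, List.mem_cons, hc]

theorem mem_flatMap_replicate (m : Char → Nat) (ds : List Char) (c : Char)
    (h : c ∈ ds.flatMap (fun d => List.replicate (m d) d)) : c ∈ ds := by
  rcases List.mem_flatMap.mp h with ⟨d, hd, hc⟩
  rw [List.eq_of_mem_replicate hc]
  exact hd

theorem pairwise_flatMap_replicate (m : Char → Nat) : ∀ (ds : List Char),
    ds.Pairwise (fun a b => b < a) →
    (ds.flatMap (fun d => List.replicate (m d) d)).Pairwise (fun a b => b ≤ a) := by
  intro ds
  induction ds with
  | nil => intro _; simp
  | cons d ds ih =>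
    intro hp
    simp only [List.flatMap_cons]
    refine List.pairwise_append.mpr ⟨?_, ih hp.of_cons, ?_⟩
    · exact List.pairwise_replicate.mpr (by simp)
    · intro x hx y hy
      rw [List.eq_of_mem_replicate hx]
      exact le_of_lt (List.rel_of_pairwise_cons hp (mem_flatMap_replicate m ds y hy))

theorem count_canon (X Y : String) (h : Pre_solution X Y) (c : Char) :
    (canon X Y).count c = mShared X Y c := by
  rw [canon, count_flatMap_replicate (mShared X Y) digitsDesc (by decide) c]
  split_ifs with hm
  · rfl
  · rcases Nat.eq_zero_or_pos (mShared X Y c) with hz | hpos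
    · exact hz.symm
    · exfalso
      have hX : c ∈ X.toList := List.count_pos_iff.mp (by unfold mShared at hpos; omega)
      have hY : c ∈ Y.toList := List.count_pos_iff.mp (by unfold mShared at hpos; omega)
      apply hm
      have hd := pre_mem h c hX hY
      simp only [digitsDesc, List.mem_cons, List.not_mem_nil, or_false] at hd ⊢
      tauto

theorem pairwise_canon (X Y : String) : (canon X Y).Pairwise (fun a b => b ≤ a) :=
  pairwise_flatMap_replicate _ digitsDesc (by decide)

-- two descending lists with the same counts are equal
theorem eq_of_counts_of_desc (l1 l2 : List Char)
    (hc : ∀ c, l1.count c = l2.count c)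
    (h1 : l1.Pairwise (fun a b => b ≤ a)) (h2 : l2.Pairwise (fun a b => b ≤ a)) : l1 = l2 := by
  have hp : l1.Perm l2 := List.perm_iff_count.mpr hc
  have := PySem.List.eq_of_perm_of_pairwise_le (l₁ := l1.reverse) (l₂ := l2.reverse)
    ((l1.reverse_perm.trans hp).trans l2.reverse_perm.symm) (List.pairwise_reverse.mpr h1) (List.pairwise_reverse.mpr h2)
  simpa using List.reverse_injective this

-- B's merged list IS canon
theorem merge_eq_canon (X Y : String) (h : Pre_solution X Y) :
    mergeCommon (PySem.List.sorted X.toList (fun c => c) true) (PySem.List.sorted Y.toList (fun c => c) true)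
      = canon X Y := by
  have hx := PySem.List.sorted_pairwise_rev X.toList (fun c => c)
  have hy := PySem.List.sorted_pairwise_rev Y.toList (fun c => c)
  apply eq_of_counts_of_desc
  · intro c
    rw [count_mergeCommon _ _ hx hy c, count_canon X Y h c]
    rw [(PySem.List.sorted_perm X.toList (fun c => c) true).count_eq,
        (PySem.List.sorted_perm Y.toList (fun c => c) true).count_eq]
    rfl
  · exact pairwise_mergeCommon _ _ hx hy
  · exact pairwise_canon X Y

-- xy_count characterisation
theorem xy_count_spec (X Y : String) :
    aXYCount X Y
      = (PySem.Set.ofList X.toList : List Char).filter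
          (fun i => (PySem.Set.ofList Y.toList : List Char).contains i) := by
  unfold aXYCount
  have := PySem.List.foldl_append_if
    (fun i => ((PySem.Set.ofList Y.toList : List Char).contains i))
    (fun i => i) (PySem.Set.ofList X.toList : List Char) []
  simpa [List.map_id'] using this

theorem mem_xy_count (X Y : String) (c : Char) :
    c ∈ aXYCount X Y ↔ (c ∈ X.toList ∧ c ∈ Y.toList) := by
  rw [xy_count_spec]
  simp only [List.mem_filter, PySem.Set.contains_iff, PySem.Set.mem_ofList]

theorem nodup_xy_count (X Y : String) : (aXYCount X Y).Nodup := by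
  rw [xy_count_spec]
  exact (PySem.Set.nodup_ofList X.toList).filter _

-- the weight added for a shared character
def wXY (X Y : String) (i : Char) : Int :=
  min (PySem.Str.count X (String.singleton i) : Int) (PySem.Str.count Y (String.singleton i) : Int)

theorem wXY_eq (X Y : String) (i : Char) : wXY X Y i = (mShared X Y i : Int) := by
  unfold wXY mShared
  rw [str_count_singleton, str_count_singleton]
  exact (Nat.cast_min _ _).symm

theorem getD_aNumbers0 (k : Char) : aNumbers0.getD k 0 = 0 := by
  have h : aNumbers0.items = [('9', 0), ('8', 0), ('7', 0), ('6', 0), ('5', 0),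
                     ('4', 0), ('3', 0), ('2', 0), ('1', 0), ('0', 0)] := by decide
  simp [PySem.Dict.getD, PySem.Dict.get?, h, List.find?_cons]
  repeat split <;> try rfl

theorem aNumbers_as_fold (X Y : String) :
    aNumbers X Y = (aXYCount X Y).foldl (fun d i => d.modify i 0 (fun v => v + wXY X Y i)) aNumbers0 := rfl

theorem getD_aNumbers (X Y : String) (k : Char) :
    (aNumbers X Y).getD k 0 = if k ∈ aXYCount X Y then wXY X Y k else 0 := by
  rw [aNumbers_as_fold,
      getD_fold_modify (wXY X Y) (aXYCount X Y) aNumbers0 k (nodup_xy_count X Y),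
      getD_aNumbers0]
  exact zero_add _

theorem keys_aNumbers (X Y : String) (h : Pre_solution X Y) : (aNumbers X Y).keys = digitsDesc := by
  rw [aNumbers_as_fold]
  rw [PySem.Dict.keys_foldl_modify (aXYCount X Y) 0 (fun _ i => (fun v => v + wXY X Y i)) aNumbers0]
  have hkeys : aNumbers0.keys = digitsDesc := by decide
  rw [hkeys]
  apply set_update_of_subset
  intro x hx
  have hs := (mem_xy_count X Y x).mp hx
  have hd := pre_mem h x hs.1 hs.2
  simp only [digitsDesc, List.mem_cons, List.not_mem_nil, or_false] at hd ⊢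
  tauto

theorem shared_iff_pos (X Y : String) (c : Char) :
    (c ∈ X.toList ∧ c ∈ Y.toList) ↔ 0 < mShared X Y c := by
  unfold mShared
  rw [← List.count_pos_iff (a := c) (l := X.toList), ← List.count_pos_iff (a := c) (l := Y.toList)]
  omega

theorem aAnswer_eq_canon (X Y : String) (h : Pre_solution X Y) : aAnswer X Y = canon X Y := by
  unfold aAnswer
  rw [keys_aNumbers X Y h,
      PySem.List.foldl_append_eq_flatMap (fun i => List.replicate ((aNumbers X Y).getD i 0).toNat i) digitsDesc []]
  rw [List.nil_append]
  unfold canon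
  apply List.flatMap_congr
  intro i _
  rw [getD_aNumbers X Y i]
  by_cases hm : i ∈ aXYCount X Y
  · rw [if_pos hm, wXY_eq]
    simp
  · rw [if_neg hm]
    have : mShared X Y i = 0 := by
      by_contra hz
      exact hm ((mem_xy_count X Y i).mpr ((shared_iff_pos X Y i).mpr (Nat.pos_of_ne_zero hz)))
    rw [this]
    rfl

theorem digit_ge_zero (c : Char) (hc : c ∈ ['0', '1', '2', '3', '4', '5', '6', '7', '8', '9']) :
    '0' ≤ c := by
  fin_cases hc <;> decide

theorem eq_singleton_zero {l : List Char} (hnd : l.Nodup) (hm : '0' ∈ l)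
    (hall : ∀ x ∈ l, x = '0') : l = ['0'] := by
  cases l with
  | nil => simp at hm
  | cons a t =>
    have ha : a = '0' := hall a List.mem_cons_self
    subst ha
    cases t with
    | nil => rfl
    | cons b t2 =>
      have hb : b = '0' := hall b (List.mem_cons_of_mem _ List.mem_cons_self)
      exact absurd (hb ▸ List.mem_cons_self) ((List.nodup_cons.mp hnd).1)

-- ===== VERDICT helper: the main equality =====
theorem main_eq (X Y : String) (h : Pre_solution X Y) : solution X Y = solution_alt X Y := by
  have hM : mergeCommon (PySem.List.sorted X.toList (fun c => c) true)
      (PySem.List.sorted Y.toList (fun c => c) true) = canon X Y := merge_eq_canon X Y h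
  have hcnt : ∀ c, (canon X Y).count c = mShared X Y c := count_canon X Y h
  have hmemM : ∀ c, c ∈ canon X Y ↔ (c ∈ X.toList ∧ c ∈ Y.toList) := by
    intro c
    rw [← List.count_pos_iff, hcnt c, ← shared_iff_pos]
  have hmemxy : ∀ c, c ∈ aXYCount X Y ↔ c ∈ canon X Y := by
    intro c
    rw [hmemM, mem_xy_count]
  unfold solution solution_alt
  rw [aAnswer_eq_canon X Y h]
  simp only [hM]
  rcases hcn : canon X Y with _ | ⟨c, t⟩
  · -- no shared characters at all: xy_count is empty, answer is empty
    have hxy : aXYCount X Y = [] := by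
      rcases hx : aXYCount X Y with _ | ⟨e, t'⟩
      · rfl
      · exact absurd ((hmemxy e).mp (hx ▸ List.mem_cons_self)) (by simp [hcn])
    simp [hxy]
  · -- some shared character
    by_cases hc0 : c = '0'
    · -- head '0': everything shared is '0', so xy_count = ['0'] and both return "0"
      subst hc0
      have hall : ∀ x ∈ canon X Y, x = '0' := by
        intro x hx
        have hle : x ≤ '0' := by
          have hp : List.Pairwise (fun a b => b ≤ a) ('0' :: t) := hcn ▸ pairwise_canon X Y
          rcases List.mem_cons.mp (hcn ▸ hx) with h1 | h1
          · exact le_of_eq h1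
          · exact List.rel_of_pairwise_cons hp h1
        have hge : '0' ≤ x :=
          digit_ge_zero x (pre_mem h x ((hmemM x).mp hx).1 ((hmemM x).mp hx).2)
        exact le_antisymm hle hge
      have hxy : aXYCount X Y = ['0'] := by
        apply eq_singleton_zero (nodup_xy_count X Y)
        · exact (hmemxy '0').mpr (hcn ▸ List.mem_cons_self)
        · intro x hx
          exact hall x ((hmemxy x).mp hx)
      rw [if_pos hxy]
      simp
    · -- head is a digit above '0': neither sentinel fires
      have hxy : aXYCount X Y ≠ ['0'] := by
        intro hx
        apply hc0
        have : c ∈ aXYCount X Y := (hmemxy c).mpr (hcn ▸ List.mem_cons_self)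
        rw [hx] at this
        simpa using this
      rw [if_neg hxy]
      simp [hc0]

-- ===== VERDICT (by name: the statement is the Claim_ definition above) =====
theorem solution_spec : Claim_equal_solution := by
  intro X Y _ hpre
  unfold Spec_solution
  exact main_eq X Y hpre
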